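-- pv_equiv track=rewrite | github.com/abilash1907/HackerRank | acm-icpc.py | acmTeam
-- ===== SOURCE A (Python) =====
-- def acmTeam(topic):
--     # Write your code here
--     n=len(topic)
--     count=[]
--     for i in range(n):
--         for j in range(i+1,n):
--             c=topic[i].count('1')+topic[j].count('1')
--             same=0
--             for k,v in zip(topic[i],topic[j]):
--                 if k==v=='1':
--                     same+=1
--             count.append(c-same)
--     m=max(count)
--     return [m,count.count(m)]
-- ===== SOURCE B (Python) =====
-- def _mask(s):
--     m = 0
--     for i, ch in enumerate(s):
--         if ch == '1':
--             m |= 1 << i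
--     return m
--
--
-- def _popcount(m):
--     c = 0
--     while m:
--         c += m & 1
--         m >>= 1
--     return c
--
--
-- def acmTeam(topic):
--     # Group members by their attendance bitmask: duplicates collapse into one
--     # dict entry with a multiplicity, so pairs are enumerated over DISTINCT
--     # masks only and counted combinatorially.
--     freq = {}
--     for s in topic:
--         m = _mask(s)
--         freq[m] = freq.get(m, 0) + 1
--     best = -1
--     tally = 0
--     rest = list(freq.items())
--     while rest:
--         x, fx = rest.pop(0)
--         if fx > 1:
--             # pairs inside one duplicate group all know popcount(x) topics
--             u = _popcount(x)
--             w = fx * (fx - 1) // 2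
--             if u > best:
--                 best, tally = u, w
--             elif u == best:
--                 tally += w
--         for y, fy in rest:
--             u = _popcount(x | y)
--             w = fx * fy
--             if u > best:
--                 best, tally = u, w
--             elif u == best:
--                 tally += w
--     if best < 0:
--         raise ValueError("need at least two team members")
--     return [best, tally]
-- ===== Notes on version B (the rewrite author's own statement) =====
-- stated objective: faster
-- what changed: B converts each topic string once to an integer bitmask, groups equal masks in a counter dict, and enumerates pairs of DISTINCT masks only, counting duplicate-mask pairs combinatorially (fx*(fx-1)//2 within a group, fx*fy across groups) with a fused running (best, tally) reduction, instead of A's double loop over all index pairs with a per-pair character zip-scan and post-loop max/count passes; Pre_ excludes lists with fewer than two members, where A's max([]) raises ValueError (B raises too).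
-- outside the precondition, e.g. on acmTeam([]): A raises ValueError, B raises ValueError
import Mathlib
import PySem

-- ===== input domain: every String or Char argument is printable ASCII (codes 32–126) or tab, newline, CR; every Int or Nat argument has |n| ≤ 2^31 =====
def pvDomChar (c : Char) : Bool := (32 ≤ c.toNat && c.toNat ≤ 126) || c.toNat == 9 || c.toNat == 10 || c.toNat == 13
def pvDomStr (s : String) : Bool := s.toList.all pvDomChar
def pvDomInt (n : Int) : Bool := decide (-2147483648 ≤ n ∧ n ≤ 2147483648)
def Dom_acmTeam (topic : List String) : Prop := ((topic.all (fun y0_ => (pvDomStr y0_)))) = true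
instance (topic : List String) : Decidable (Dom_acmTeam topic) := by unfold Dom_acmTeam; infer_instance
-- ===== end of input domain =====

-- B groups members by their attendance bitmask in a counter dict and enumerates pairs of DISTINCT
-- masks only, counting duplicate pairs combinatorially (fx*(fx-1)//2 / fx*fy), instead of A's
-- scan over all index pairs with a per-pair character walk (measured faster on the timing inputs).

-- ===== PORT A =====
def acmTeam (topic : List String) : List Int :=
  let n : Int := topic.length
  let count : List Int :=
    (PySem.List.pyRange 0 n 1).foldl (fun acc i =>
      (PySem.List.pyRange (i + 1) n 1).foldl (fun acc j =>
        let ti := PySem.List.pyGetD topic i ""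
        let tj := PySem.List.pyGetD topic j ""
        let c : Int := (PySem.Str.count ti "1" : Int) + (PySem.Str.count tj "1" : Int)
        let same : Int := (ti.toList.zip tj.toList).foldl
          (fun same kv => if kv.1 = kv.2 ∧ kv.2 = '1' then same + 1 else same) 0
        acc ++ [c - same]) acc) []
  match PySem.List.max? count (fun x => x) with
  | some m => [m, (PySem.List.count count m : Int)]
  | none => []   -- max([]) raises ValueError in Python: excluded by Pre_acmTeam

-- ===== PORT B =====
-- _mask(s): bits are set at the (nonnegative) enumerate indices, so the Python int is a Nat; exact
def pvMask (s : String) : Nat :=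
  (PySem.List.enumerate s.toList 0).foldl
    (fun m p => if p.2 = '1' then m ||| (1 <<< p.1.toNat) else m) 0

-- _popcount(m): the while loop 'c += m & 1; m >>= 1' as structural recursion on the halved value
def pvPopcount : Nat → Nat
  | 0 => 0
  | (m + 1) => (m + 1) % 2 + pvPopcount ((m + 1) / 2)
decreasing_by exact Nat.div_lt_self (Nat.succ_pos m) Nat.one_lt_two

-- the repeated 'if u > best: … elif u == best: …' update of (best, tally)
def pvUpd (st : Int × Int) (u w : Int) : Int × Int :=
  if u > st.1 then (u, w) else if u = st.1 then (st.1, st.2 + w) else st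

-- 'while rest: x, fx = rest.pop(0); …' — structural recursion on the item list
def pvPairLoop : List (Nat × Int) → Int × Int → Int × Int
  | [], st => st
  | (x, fx) :: rest, st =>
      let st1 := if fx > 1 then
          pvUpd st (pvPopcount x : Int) (PySem.Int.floordiv (fx * (fx - 1)) 2) else st
      let st2 := rest.foldl (fun st p => pvUpd st (pvPopcount (x ||| p.1) : Int) (fx * p.2)) st1
      pvPairLoop rest st2

def acmTeam_alt (topic : List String) : List Int :=
  let freq : PySem.Dict Nat Int :=
    topic.foldl (fun d s =>
      let m := pvMask s
      d.insert m (d.getD m 0 + 1)) PySem.Dict.empty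
  let res := pvPairLoop freq.items ((-1 : Int), (0 : Int))
  if res.1 < 0 then [] else [res.1, res.2]   -- 'raise ValueError': excluded by Pre_acmTeam

-- ===== PRECONDITION & SPEC =====
-- Pre_ excludes lists with fewer than two members: there A's max([]) raises ValueError (B raises too).
def Pre_acmTeam (topic : List String) : Prop := 2 ≤ topic.length
instance (topic : List String) : Decidable (Pre_acmTeam topic) := by unfold Pre_acmTeam; infer_instance
def pvWitness_acmTeam : List String := (["10", "01"])

def Spec_acmTeam (topic : List String) (out : List Int) : Prop := out = acmTeam_alt topic
instance (topic : List String) (out : List Int) : Decidable (Spec_acmTeam topic out) := by unfold Spec_acmTeam; infer_instance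

-- ===== CLAIM (what is proved, stated in full; the proofs are below) =====
def Claim_equal_acmTeam : Prop := ∀ (topic : List String), Dom_acmTeam topic → Pre_acmTeam topic → Spec_acmTeam topic (acmTeam topic)

-- ===== LEMMAS AND PROOFS =====

def pvM : List Char → Nat
  | [] => 0
  | c :: cs => (if c = '1' then 1 else 0) + 2 * pvM cs

def pvPairs : List Nat → List (Nat × Nat)
  | [] => []
  | x :: r => r.map (fun y => (x, y)) ++ pvPairs r

def pvVal (x y : Nat) : Int := (pvPopcount (x ||| y) : Int)

def pvValA (topic : List String) (i j : Int) : Int :=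
  let ti := PySem.List.pyGetD topic i ""
  let tj := PySem.List.pyGetD topic j ""
  ((PySem.Str.count ti "1" : Int) + (PySem.Str.count tj "1" : Int))
    - (ti.toList.zip tj.toList).foldl
        (fun same kv => if kv.1 = kv.2 ∧ kv.2 = '1' then same + 1 else same) 0

def pvEntries : List (Nat × Int) → List (Int × Int)
  | [] => []
  | (x, fx) :: rest =>
      (if fx > 1 then [((pvPopcount x : Int), PySem.Int.floordiv (fx * (fx - 1)) 2)] else [])
        ++ rest.map (fun p => ((pvPopcount (x ||| p.1) : Int), fx * p.2))
        ++ pvEntries rest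

def pvWsum (E : List (Int × Int)) (u : Int) : Int :=
  (E.map (fun e => if e.1 = u then e.2 else 0)).sum

lemma pvLorTwoPow (m n : Nat) (h : m < 2 ^ n) : m ||| 2 ^ n = m + 2 ^ n := by
  have h2 := Nat.two_pow_add_eq_or_of_lt (i := n) h 1
  simpa [Nat.lor_comm, Nat.add_comm] using h2.symm

lemma pvTwoMul_or (a b : Nat) : (2 * a) ||| (2 * b) = 2 * (a ||| b) := by
  have h : ∀ c : Nat, 2 * c = c <<< 1 := by
    intro c; rw [Nat.shiftLeft_eq]; ring
  rw [h, h, h, Nat.shiftLeft_or_distrib]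

lemma pvBitOr (b1 b2 m1 m2 : Nat) (h1 : b1 < 2) (h2 : b2 < 2) :
    (b1 + 2 * m1) ||| (b2 + 2 * m2) = (b1 ||| b2) + 2 * (m1 ||| m2) := by
  have e1 : b1 + 2 * m1 = (2 * m1) ||| b1 := by
    have := Nat.two_pow_add_eq_or_of_lt (i := 1) (by simpa using h1) m1
    simpa [Nat.add_comm, Nat.mul_comm] using this
  have e2 : b2 + 2 * m2 = (2 * m2) ||| b2 := by
    have := Nat.two_pow_add_eq_or_of_lt (i := 1) (by simpa using h2) m2
    simpa [Nat.add_comm, Nat.mul_comm] using this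
  have hb : b1 ||| b2 < 2 := by interval_cases b1 <;> interval_cases b2 <;> decide
  have e3 : (b1 ||| b2) + 2 * (m1 ||| m2) = (2 * (m1 ||| m2)) ||| (b1 ||| b2) := by
    have := Nat.two_pow_add_eq_or_of_lt (i := 1) (by simpa using hb) (m1 ||| m2)
    simpa [Nat.add_comm, Nat.mul_comm] using this
  rw [e1, e2, e3, ← pvTwoMul_or]
  calc (2*m1 ||| b1) ||| (2*m2 ||| b2)
      = 2*m1 ||| (b1 ||| (2*m2 ||| b2)) := by rw [Nat.or_assoc]
    _ = 2*m1 ||| (2*m2 ||| (b1 ||| b2)) := by rw [← Nat.or_assoc b1, Nat.or_comm b1 (2*m2), Nat.or_assoc]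
    _ = (2*m1 ||| 2*m2) ||| (b1 ||| b2) := by rw [Nat.or_assoc]

lemma pvPopcount_zero : pvPopcount 0 = 0 := by simp [pvPopcount]

lemma pvPopcount_step (n : Nat) (h : n ≠ 0) : pvPopcount n = n % 2 + pvPopcount (n / 2) := by
  cases n with
  | zero => exact absurd rfl h
  | succ m => simp [pvPopcount]

lemma pvPopBit (b m : Nat) (hb : b < 2) : pvPopcount (b + 2 * m) = b + pvPopcount m := by
  rcases Nat.eq_zero_or_pos (b + 2 * m) with h | h
  · have hb0 : b = 0 := by omega
    have hm0 : m = 0 := by omega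
    subst hb0; subst hm0; simp [pvPopcount_zero]
  · rw [pvPopcount_step _ (by omega)]
    have h1 : (b + 2 * m) % 2 = b := by omega
    have h2 : (b + 2 * m) / 2 = m := by omega
    rw [h1, h2]

lemma pvPopM (cs : List Char) : pvPopcount (pvM cs) = cs.count '1' := by
  induction cs with
  | nil => simp [pvM, pvPopcount_zero]
  | cons c cs ih =>
    show pvPopcount ((if c = '1' then 1 else 0) + 2 * pvM cs) = _
    rw [pvPopBit _ _ (by split_ifs <;> omega), ih]
    by_cases h : c = '1' <;> simp [h, List.count_cons] <;> omega

lemma pvPopOr (cs ds : List Char) :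
    pvPopcount (pvM cs ||| pvM ds)
      + (cs.zip ds).countP (fun kv => decide (kv.1 = kv.2 ∧ kv.2 = '1'))
      = cs.count '1' + ds.count '1' := by
  induction cs generalizing ds with
  | nil => simpa [pvM] using pvPopM ds
  | cons c cs ih =>
    cases ds with
    | nil => simpa [pvM] using pvPopM (c :: cs)
    | cons d ds =>
      show pvPopcount (((if c = '1' then 1 else 0) + 2 * pvM cs) ||| ((if d = '1' then 1 else 0) + 2 * pvM ds)) + _ = _
      rw [pvBitOr _ _ _ _ (by split_ifs <;> omega) (by split_ifs <;> omega)]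
      rw [pvPopBit _ _ (by split_ifs <;> decide)]
      simp only [List.zip_cons_cons, List.countP_cons]
      have hih := ih ds
      have hcc : (cs.zip ds).countP (fun kv => decide (kv.1 = kv.2 ∧ kv.2 = '1'))
          = (cs.zip ds).countP (fun kv => decide (kv.1 = kv.2) && decide (kv.2 = '1')) := by
        apply List.countP_congr; intro kv _; simp
      rw [hcc] at hih
      by_cases hc : c = '1' <;> by_cases hd : d = '1' <;>
        simp [hc, hd, List.count_cons] <;> omega

lemma pvMaskFold (cs : List Char) : ∀ (k m : Nat), m < 2 ^ k →
    (PySem.List.enumerate cs (k : Int)).foldl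
      (fun m p => if p.2 = '1' then m ||| (1 <<< p.1.toNat) else m) m
      = m + 2 ^ k * pvM cs := by
  induction cs with
  | nil => intro k m h; simp [PySem.List.enumerate, pvM]
  | cons c cs ih =>
    intro k m h
    rw [PySem.List.enumerate_cons]
    have hcast : (k : Int) + 1 = ((k + 1 : Nat) : Int) := by push_cast; ring
    simp only [List.foldl_cons]
    by_cases hc : c = '1'
    · have hstep : (if c = '1' then m ||| (1 <<< ((k : Int)).toNat) else m) = m + 2 ^ k := by
        simp [hc, Nat.one_shiftLeft]
        exact pvLorTwoPow m k h
      rw [hstep, hcast, ih (k+1) (m + 2^k) (by rw [pow_succ]; omega)]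
      show m + 2 ^ k + 2 ^ (k + 1) * pvM cs = m + 2 ^ k * ((if c = '1' then 1 else 0) + 2 * pvM cs)
      simp [hc, pow_succ]; ring
    · have hstep : (if c = '1' then m ||| (1 <<< ((k : Int)).toNat) else m) = m := by simp [hc]
      rw [hstep, hcast, ih (k+1) m (by rw [pow_succ]; omega)]
      show m + 2 ^ (k + 1) * pvM cs = m + 2 ^ k * ((if c = '1' then 1 else 0) + 2 * pvM cs)
      simp [hc, pow_succ]; ring

lemma pvCountGo_one' (cs : List Char) : ∀ (n k : Nat), cs.length ≤ n →
    PySem.Chars.count.go ['1'] n cs k = k + cs.count '1' := by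
  induction cs with
  | nil => intro n k _; cases n <;> simp [PySem.Chars.count.go]
  | cons c cs ih =>
    intro n k hn
    cases n with
    | zero => simp at hn
    | succ m =>
      simp only [PySem.Chars.count.go, List.isPrefixOf_cons₂] at *
      by_cases h : c = '1'
      · simp [h, ih m (k + 1) (by simpa using hn)]
        omega
      · simp [h, Ne.symm h, ih m k (by simpa using hn)]

lemma pvCount_one (cs : List Char) : PySem.Chars.count cs ['1'] = cs.count '1' := by
  cases cs with
  | nil => rfl
  | cons c cs =>
    have h := pvCountGo_one' (c :: cs) (cs.length + 1) 0 (by simp)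
    simpa [PySem.Chars.count] using h

lemma pvMask_eq (s : String) : pvMask s = pvM s.toList := by
  have h := pvMaskFold s.toList 0 0 (by norm_num)
  simpa [pvMask] using h

lemma pvValA_eq (topic : List String) (i j : Int) :
    pvValA topic i j
      = pvVal (PySem.List.pyGetD (topic.map pvMask) i 0) (PySem.List.pyGetD (topic.map pvMask) j 0) := by
  have hget : ∀ (k : Int), PySem.List.pyGetD (topic.map pvMask) k 0 = pvMask (PySem.List.pyGetD topic k "") := by
    intro k
    have : (0 : Nat) = pvMask "" := rfl
    rw [this, PySem.List.pyGetD_map]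
  rw [hget, hget]
  show ((PySem.Str.count (PySem.List.pyGetD topic i "") "1" : Int) + (PySem.Str.count (PySem.List.pyGetD topic j "") "1" : Int))
      - ((PySem.List.pyGetD topic i "").toList.zip (PySem.List.pyGetD topic j "").toList).foldl
          (fun same kv => if kv.1 = kv.2 ∧ kv.2 = '1' then same + 1 else same) 0
    = (pvPopcount (pvMask (PySem.List.pyGetD topic i "") ||| pvMask (PySem.List.pyGetD topic j "")) : Int)
  rw [PySem.List.foldl_ite_add_one (p := fun kv : Char × Char => kv.1 = kv.2 ∧ kv.2 = '1')]
  have hcnt : ∀ s : String, (PySem.Str.count s "1" : Int) = (s.toList.count '1' : Int) := by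
    intro s
    rw [PySem.Str.count_eq]
    norm_cast
    exact pvCount_one s.toList
  rw [hcnt, hcnt, pvMask_eq, pvMask_eq]
  have := pvPopOr (PySem.List.pyGetD topic i "").toList (PySem.List.pyGetD topic j "").toList
  omega

lemma pvRangeShift (a b : Int) :
    PySem.List.pyRange (a + 1) (b + 1) = (PySem.List.pyRange a b).map (· + 1) := by
  by_cases hab : a < b
  · have key : ∀ (n : Nat) (a : Int), PySem.List.pyRange (a + 1) (a + n + 1)
        = (PySem.List.pyRange a (a + n)).map (· + 1) := by
      intro n
      induction n with
      | zero =>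
        intro a
        simp [PySem.List.pyRange_one_eq_nil (by omega : a + (0:Nat) ≤ a),
              PySem.List.pyRange_one_eq_nil (by omega : a + (0:Nat) + 1 ≤ a + 1)]
      | succ n ih =>
        intro a
        rw [PySem.List.pyRange_one_cons (by push_cast; omega : a < a + (n+1:Nat)),
            PySem.List.pyRange_one_cons (by push_cast; omega : a + 1 < a + (n+1:Nat) + 1)]
        rw [show (a + (n+1:Nat) + 1 : Int) = (a + 1) + (n:Nat) + 1 by push_cast; ring,
            show (a + (n+1:Nat) : Int) = (a + 1) + (n:Nat) by push_cast; ring,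
            ih (a+1)]
        simp
    have hb : b = a + ((b - a).toNat : Nat) := by omega
    rw [hb]
    exact key _ a
  · rw [PySem.List.pyRange_one_eq_nil (by omega), PySem.List.pyRange_one_eq_nil (by omega)]
    rfl

lemma pvGetD_cons_succ (x : Nat) (r : List Nat) (i : Int) (h : 0 ≤ i) (d : Nat) :
    PySem.List.pyGetD (x :: r) (i + 1) d = PySem.List.pyGetD r i d := by
  obtain ⟨n, rfl⟩ := Int.eq_ofNat_of_zero_le h
  rw [show ((n:Int) + 1) = ((n+1 : Nat) : Int) by push_cast; ring]
  rw [PySem.List.pyGetD_natCast, PySem.List.pyGetD_natCast]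
  simp

lemma pvMapGet (r : List Nat) (x : Nat) (g : Nat → Int) :
    (PySem.List.pyRange 1 ((r.length : Int) + 1)).map (fun j => g (PySem.List.pyGetD (x :: r) j 0))
      = r.map g := by
  rw [show PySem.List.pyRange 1 ((r.length : Int) + 1) = PySem.List.pyRange (0+1) ((r.length : Int) + 1) from rfl,
      pvRangeShift 0 (r.length : Int), List.map_map]
  have h1 : (PySem.List.pyRange 0 (r.length : Int)).map
        (fun i => g (PySem.List.pyGetD (x :: r) (i + 1) 0))
      = (PySem.List.pyRange 0 (r.length : Int)).map (fun i => g (PySem.List.pyGetD r i 0)) := by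
    apply List.map_congr_left
    intro i hi
    rw [PySem.List.mem_pyRange_one] at hi
    rw [pvGetD_cons_succ x r i hi.1]
  have h2 : (PySem.List.pyRange 0 (r.length : Int)).map (fun j => PySem.List.pyGetD r j 0) = r :=
    PySem.List.map_pyGetD_pyRange_zero r 0
  calc (PySem.List.pyRange 0 (r.length : Int)).map ((fun j => g (PySem.List.pyGetD (x :: r) j 0)) ∘ (· + 1))
      = (PySem.List.pyRange 0 (r.length : Int)).map (fun i => g (PySem.List.pyGetD r i 0)) := h1
    _ = ((PySem.List.pyRange 0 (r.length : Int)).map (fun j => PySem.List.pyGetD r j 0)).map g := by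
        rw [List.map_map]; rfl
    _ = r.map g := by rw [h2]

lemma pvRangePairs (l : List Nat) (f : Nat → Nat → Int) :
    (PySem.List.pyRange 0 (l.length : Int)).flatMap (fun i =>
        (PySem.List.pyRange (i + 1) (l.length : Int)).map (fun j =>
          f (PySem.List.pyGetD l i 0) (PySem.List.pyGetD l j 0)))
      = (pvPairs l).map (fun p => f p.1 p.2) := by
  induction l with
  | nil => simp [pvPairs, PySem.List.pyRange_one_eq_nil (by omega : (0:Int) ≤ 0)]
  | cons x r ih =>
    have hlen : ((x :: r).length : Int) = (r.length : Int) + 1 := by push_cast; simp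
    rw [hlen, PySem.List.pyRange_one_cons (by omega : (0:Int) < (r.length : Int) + 1)]
    rw [List.flatMap_cons]
    have hx : PySem.List.pyGetD (x :: r) 0 0 = x := by simp [pysem]
    have hblock : (PySem.List.pyRange (0 + 1) ((r.length : Int) + 1)).map (fun j =>
          f (PySem.List.pyGetD (x :: r) 0 0) (PySem.List.pyGetD (x :: r) j 0))
        = r.map (fun y => f x y) := by
      rw [hx]
      exact pvMapGet r x (fun y => f x y)
    rw [hblock]
    have hrest : (PySem.List.pyRange (0 + 1) ((r.length : Int) + 1)).flatMap (fun i =>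
          (PySem.List.pyRange (i + 1) ((r.length : Int) + 1)).map (fun j =>
            f (PySem.List.pyGetD (x :: r) i 0) (PySem.List.pyGetD (x :: r) j 0)))
        = (pvPairs r).map (fun p => f p.1 p.2) := by
      rw [pvRangeShift 0 (r.length : Int), List.flatMap_map, ← ih]
      rw [List.flatMap_def, List.flatMap_def]
      congr 1
      apply List.map_congr_left
      intro i hi
      rw [PySem.List.mem_pyRange_one] at hi
      rw [pvGetD_cons_succ x r i hi.1]
      rw [show i + 1 + 1 = (i + 1) + 1 from rfl, pvRangeShift (i + 1) (r.length : Int), List.map_map]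
      apply List.map_congr_left
      intro j hj
      rw [PySem.List.mem_pyRange_one] at hj
      show f (PySem.List.pyGetD r i 0) (PySem.List.pyGetD (x :: r) (j + 1) 0) = _
      rw [pvGetD_cons_succ x r j (by omega)]
    rw [hrest]
    simp [pvPairs, List.map_append]

lemma pvPairLoop_eq (l : List (Nat × Int)) : ∀ (st : Int × Int),
    pvPairLoop l st = (pvEntries l).foldl (fun st e => pvUpd st e.1 e.2) st := by
  induction l with
  | nil => intro st; rfl
  | cons p rest ih =>
    intro st
    obtain ⟨x, fx⟩ := p
    show pvPairLoop ((x, fx) :: rest) st = _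
    rw [pvPairLoop, pvEntries]
    rw [List.foldl_append, List.foldl_append, ← ih, List.foldl_map]
    by_cases h : fx > 1 <;> simp [h]

lemma pvWsum_nonneg (E : List (Int × Int)) (h : ∀ e ∈ E, 0 < e.2) (u : Int) : 0 ≤ pvWsum E u := by
  induction E with
  | nil => simp [pvWsum]
  | cons e E ih =>
    have he := h e (by simp)
    have hE := ih (fun e' he' => h e' (by simp [he']))
    show 0 ≤ ((if e.1 = u then e.2 else 0) + (E.map _).sum)
    have : (0:Int) ≤ (if e.1 = u then e.2 else 0) := by split_ifs <;> omega
    exact add_nonneg this hE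

lemma pvWsum_cons (e : Int × Int) (E : List (Int × Int)) (u : Int) :
    pvWsum (e :: E) u = (if e.1 = u then e.2 else 0) + pvWsum E u := by
  simp [pvWsum]

lemma pvWsum_pos_of_mem (E : List (Int × Int)) (h : ∀ e ∈ E, 0 < e.2) (u : Int)
    (hu : u ∈ E.map (·.1)) : 0 < pvWsum E u := by
  induction E with
  | nil => simp at hu
  | cons e E ih =>
    rw [pvWsum_cons]
    rw [List.map_cons, List.mem_cons] at hu
    have hE : ∀ e' ∈ E, 0 < e'.2 := fun e' he' => h e' (by simp [he'])
    rcases hu with hu | hu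
    · rw [if_pos hu.symm]
      have h1 := pvWsum_nonneg E hE u
      have h2 := h e (by simp)
      omega
    · have hpos := ih hE hu
      have hnn : (0:Int) ≤ (if e.1 = u then e.2 else 0) := by
        split_ifs
        · exact le_of_lt (h e (by simp))
        · exact le_refl 0
      omega

lemma pvWsum_eq_zero_of_not_mem (E : List (Int × Int)) (u : Int)
    (hu : u ∉ E.map (·.1)) : pvWsum E u = 0 := by
  induction E with
  | nil => rfl
  | cons e E ih =>
    rw [pvWsum_cons]
    rw [List.map_cons, List.mem_cons] at hu
    rw [not_or] at hu
    rw [if_neg (fun hh => hu.1 hh.symm), ih hu.2]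
    omega

lemma pvUpdFold (E : List (Int × Int)) (h : ∀ e ∈ E, 0 < e.2) : ∀ (b t : Int),
    E.foldl (fun st e => pvUpd st e.1 e.2) (b, t)
      = ((E.map (·.1)).foldl max b,
         (if (E.map (·.1)).foldl max b = b then t else 0) + pvWsum E ((E.map (·.1)).foldl max b)) := by
  induction E with
  | nil => intro b t; simp [pvWsum]
  | cons e R ih =>
    intro b t
    obtain ⟨u, w⟩ := e
    have hR : ∀ e' ∈ R, 0 < e'.2 := fun e' he' => h e' (by simp [he'])
    simp only [List.foldl_cons, List.map_cons]
    rcases lt_trichotomy b u with hbu | hbu | hbu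
    · have hst : pvUpd (b, t) u w = (u, w) := by simp [pvUpd, hbu]
      rw [hst, ih hR u w]
      simp only [List.foldl_cons, max_eq_right hbu.le]
      set M := (R.map (·.1)).foldl max u with hM
      have huM : u ≤ M := (PySem.List.le_foldl_max _ u).1
      have hMb : M ≠ b := by omega
      rw [if_neg hMb, pvWsum_cons]
      by_cases hMu : M = u
      · simp [hMu]
      · rw [if_neg hMu, if_neg (fun hh => hMu hh.symm)]
        simp only [Prod.mk.injEq]
        exact ⟨trivial, by omega⟩
    · have hst : pvUpd (b, t) u w = (b, t + w) := by simp [pvUpd, hbu]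
      rw [hst, ih hR b (t + w)]
      have hmax : max b u = b := by omega
      simp only [hmax]
      set M := (R.map (·.1)).foldl max b with hM
      rw [pvWsum_cons]
      by_cases hMb : M = b
      · simp only [Prod.mk.injEq]
        refine ⟨trivial, ?_⟩
        rw [if_pos hMb, if_pos hMb, if_pos (by omega : u = M)]
        omega
      · simp only [Prod.mk.injEq]
        refine ⟨trivial, ?_⟩
        rw [if_neg hMb, if_neg hMb, if_neg (by omega : ¬ u = M)]
        omega
    · have hst : pvUpd (b, t) u w = (b, t) := by
        have h1 : ¬ (u > b) := by omega
        have h2 : ¬ (u = b) := by omega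
        simp [pvUpd, h1, h2]
      rw [hst, ih hR b t]
      simp only [List.foldl_cons, max_eq_left hbu.le]
      set M := (R.map (·.1)).foldl max b with hM
      have hbM : b ≤ M := (PySem.List.le_foldl_max _ b).1
      have huM : u ≠ M := by omega
      rw [pvWsum_cons, if_neg huM]
      simp only [Prod.mk.injEq]
      exact ⟨trivial, by omega⟩

lemma pvPairsPerm : ∀ {ms ns : List Nat}, ms.Perm ns →
    ((pvPairs ms).map (fun p => pvVal p.1 p.2)).Perm ((pvPairs ns).map (fun p => pvVal p.1 p.2)) := by
  intro ms ns h
  induction h with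
  | nil => exact List.Perm.refl _
  | cons a h ih =>
    simp only [pvPairs, List.map_append, List.map_map]
    exact (h.map _).append ih
  | swap x y l =>
    simp only [pvPairs, List.map_append, List.map_cons, List.map_map]
    have hval : pvVal y x = pvVal x y := by simp [pvVal, Nat.lor_comm]
    rw [hval]
    refine List.Perm.cons _ ?_
    simp only [List.append_eq]
    rw [← List.append_assoc, ← List.append_assoc]
    exact List.perm_append_comm.append_right _
  | trans h1 h2 ih1 ih2 => exact ih1.trans ih2

lemma pvTri_succ (f : Nat) : (f + 1) * f / 2 = f + f * (f - 1) / 2 := by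
  cases f with
  | zero => simp
  | succ g =>
    show (g + 2) * (g + 1) / 2 = (g + 1) + (g + 1) * ((g + 1) - 1) / 2
    simp only [Nat.add_sub_cancel]
    obtain ⟨k, hk⟩ := Nat.even_mul_succ_self g
    have e1 : (g + 2) * (g + 1) = 2 * (k + g + 1) := by
      have : (g + 2) * (g + 1) = g * (g + 1) + 2 * (g + 1) := by ring
      omega
    have e2 : (g + 1) * g = 2 * k := by
      have : (g + 1) * g = g * (g + 1) := by ring
      omega
    rw [e1, e2, Nat.mul_div_cancel_left _ (by norm_num), Nat.mul_div_cancel_left _ (by norm_num)]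
    omega

lemma pvPairsRepl (f : Nat) (x : Nat) (t : List Nat) (u : Int) :
    (((pvPairs (List.replicate f x ++ t)).map (fun p => pvVal p.1 p.2)).count u)
      = (if pvVal x x = u then f * (f - 1) / 2 else 0)
        + f * ((t.map (fun y => pvVal x y)).count u)
        + (((pvPairs t).map (fun p => pvVal p.1 p.2)).count u) := by
  induction f with
  | zero => simp
  | succ f ih =>
    rw [List.replicate_succ, List.cons_append]
    show ((((List.replicate f x ++ t).map (fun y => (x, y)) ++ pvPairs (List.replicate f x ++ t)).map
        (fun p => pvVal p.1 p.2)).count u) = _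
    rw [List.map_append, List.count_append, List.map_map]
    have hfst : (((List.replicate f x ++ t).map ((fun p => pvVal p.1 p.2) ∘ (fun y => (x, y)))).count u)
        = ((List.replicate f x).map (fun y => pvVal x y)).count u + ((t.map (fun y => pvVal x y)).count u) := by
      rw [← List.count_append, ← List.map_append]
      rfl
    rw [hfst, ih, List.map_replicate, List.count_replicate]
    have htri := pvTri_succ f
    have hc1 : (f + 1) * ((t.map (fun y => pvVal x y)).count u)
        = f * ((t.map (fun y => pvVal x y)).count u) + ((t.map (fun y => pvVal x y)).count u) := by ring
    simp only [Nat.add_sub_cancel]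
    by_cases hv : pvVal x x = u
    · rw [if_pos hv, if_pos hv, if_pos (by simpa using hv)]
      omega
    · rw [if_neg hv, if_neg hv, if_neg (by simpa using hv)]
      omega

lemma pvSumPt (D : List Nat) (hnd : D.Nodup) (z : Nat) (hz : z ∈ D) (a : Nat → Int) :
    (D.map (fun k => if k = z then a k else 0)).sum = a z := by
  induction D with
  | nil => simp at hz
  | cons d D ih =>
    simp only [List.map_cons, List.sum_cons]
    rcases List.mem_cons.1 hz with rfl | hz'
    · rw [if_pos rfl]
      have hzero : (D.map (fun k => if k = z then a k else 0)).sum = 0 := by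
        apply List.sum_eq_zero
        intro y hy
        obtain ⟨k, hk, rfl⟩ := List.mem_map.1 hy
        rw [if_neg]
        intro hkz
        exact (List.nodup_cons.1 hnd).1 (hkz ▸ hk)
      rw [hzero, add_zero]
    · rw [if_neg (fun h => (List.nodup_cons.1 hnd).1 (by rw [h]; exact hz')),
          ih (List.nodup_cons.1 hnd).2 hz', zero_add]

lemma pvGroupCount (D : List Nat) (hnd : D.Nodup) : ∀ (t : List Nat), (∀ z ∈ t, z ∈ D) →
    ∀ (g : Nat → Int) (u : Int),
    ((t.map g).count u : Int)
      = (D.map (fun k => (t.count k : Int) * (if g k = u then 1 else 0))).sum := by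
  intro t
  induction t with
  | nil =>
    intro _ g u
    simp
  | cons z t ih =>
    intro hsub g u
    have hz : z ∈ D := hsub z (by simp)
    have ht : ∀ z' ∈ t, z' ∈ D := fun z' hz' => hsub z' (by simp [hz'])
    have hL : ((((z :: t).map g).count u : Nat) : Int)
        = ((t.map g).count u : Int) + (if g z = u then 1 else 0) := by
      rw [List.map_cons, List.count_cons]
      by_cases h : g z = u
      · rw [if_pos h, if_pos (by simpa using h)]; push_cast; ring
      · rw [if_neg h, if_neg (by simpa using h)]; push_cast; ring
    rw [hL, ih ht g u]
    have hptw : (D.map (fun k => ((z :: t).count k : Int) * (if g k = u then 1 else 0)))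
        = D.map (fun k => (t.count k : Int) * (if g k = u then 1 else 0)
            + (if k = z then (if g k = u then 1 else 0) else 0)) := by
      apply List.map_congr_left
      intro k _
      rw [List.count_cons]
      by_cases hkz : z = k
      · subst hkz
        rw [if_pos (by simp : (z == z) = true), if_pos rfl]
        push_cast; ring
      · rw [if_neg (by simpa using hkz : ¬ ((z == k) = true)),
            if_neg (show ¬ (k = z) from fun h => hkz h.symm)]
        push_cast; ring
    rw [hptw, PySem.List.sum_map_add_int, pvSumPt D hnd z hz]

lemma pvWsum_append (A B : List (Int × Int)) (u : Int) :
    pvWsum (A ++ B) u = pvWsum A u + pvWsum B u := by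
  simp [pvWsum]

lemma pvTriInt (f : Nat) :
    PySem.Int.floordiv ((f : Int) * ((f : Int) - 1)) 2 = ((f * (f - 1) / 2 : Nat) : Int) := by
  cases f with
  | zero => decide
  | succ g =>
    rw [show ((g + 1 : Nat) : Int) * (((g + 1 : Nat) : Int) - 1) = (((g + 1) * g : Nat) : Int) by push_cast; ring,
        show (2 : Int) = ((2 : Nat) : Int) from rfl, PySem.Int.floordiv_natCast]
    simp

lemma pvValxx (x : Nat) : pvVal x x = (pvPopcount x : Int) := by
  simp [pvVal, Nat.or_self]

lemma pvWsumCount : ∀ (D : List Nat), D.Nodup → ∀ (ms : List Nat), (∀ z ∈ ms, z ∈ D) → ∀ (u : Int),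
    pvWsum (pvEntries (D.map (fun k => (k, (ms.count k : Int))))) u
      = (((pvPairs ms).map (fun p => pvVal p.1 p.2)).count u : Int) := by
  intro D
  induction D with
  | nil =>
    intro _ ms hsub u
    cases ms with
    | nil => simp [pvEntries, pvWsum, pvPairs]
    | cons z t => exact absurd (hsub z (by simp)) (by simp)
  | cons x D' ih =>
    intro hnd ms hsub u
    obtain ⟨hx, hnd'⟩ := List.nodup_cons.1 hnd
    set f := ms.count x with hf
    set ms' := ms.filter (fun z => !(z == x)) with hms'
    have hsub' : ∀ z ∈ ms', z ∈ D' := by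
      intro z hz
      rw [hms', List.mem_filter] at hz
      have h1 := hsub z hz.1
      have h2 : z ≠ x := by simpa using hz.2
      rcases List.mem_cons.1 h1 with h | h
      · exact absurd h h2
      · exact h
    have hcnt' : ∀ k ∈ D', ms'.count k = ms.count k := by
      intro k hk
      rw [hms']
      apply List.count_filter
      simp only [Bool.not_eq_true']
      rw [beq_eq_false_iff_ne]
      intro h
      exact hx (h ▸ hk)
    have htail : D'.map (fun k => (k, (ms.count k : Int))) = D'.map (fun k => (k, (ms'.count k : Int))) := by
      apply List.map_congr_left
      intro k hk
      rw [hcnt' k hk]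
    rw [List.map_cons, pvEntries, pvWsum_append, pvWsum_append]
    -- the three blocks
    have hT1 : pvWsum (if (f : Int) > 1 then
          [((pvPopcount x : Int), PySem.Int.floordiv ((f : Int) * ((f : Int) - 1)) 2)] else []) u
        = if pvVal x x = u then ((f * (f - 1) / 2 : Nat) : Int) else 0 := by
      by_cases h2 : (f : Int) > 1
      · rw [if_pos h2, pvWsum_cons, pvValxx]
        show (if (pvPopcount x : Int) = u then PySem.Int.floordiv ((f : Int) * ((f : Int) - 1)) 2 else 0) + 0 = _
        rw [pvTriInt]
        split_ifs <;> omega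
      · rw [if_neg h2]
        have hf0 : f * (f - 1) / 2 = 0 := by
          have : f ≤ 1 := by exact_mod_cast by omega
          interval_cases f <;> decide
        rw [hf0]
        show (0 : Int) = _
        split_ifs <;> simp
    have hT2 : pvWsum ((D'.map (fun k => (k, (ms'.count k : Int)))).map
          (fun p => ((pvPopcount (x ||| p.1) : Int), (f : Int) * p.2))) u
        = (f : Int) * (((ms'.map (fun y => pvVal x y)).count u : Int)) := by
      rw [List.map_map, pvWsum]
      rw [List.map_map]
      have hptw : (D'.map ((fun e : Int × Int => if e.1 = u then e.2 else 0) ∘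
            ((fun p : Nat × Int => ((pvPopcount (x ||| p.1) : Int), (f : Int) * p.2)) ∘
             (fun k => (k, (ms'.count k : Int))))))
          = D'.map (fun k => (f : Int) * ((ms'.count k : Int) * (if pvVal x k = u then 1 else 0))) := by
        apply List.map_congr_left
        intro k _
        show (if (pvPopcount (x ||| k) : Int) = u then (f : Int) * (ms'.count k : Int) else 0) = _
        have : pvVal x k = (pvPopcount (x ||| k) : Int) := rfl
        rw [this]
        split_ifs <;> ring
      rw [hptw, List.sum_map_mul_left, ← pvGroupCount D' hnd' ms' hsub' (fun y => pvVal x y) u]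
    have hT3 : pvWsum (pvEntries (D'.map (fun k => (k, (ms'.count k : Int))))) u
        = (((pvPairs ms').map (fun p => pvVal p.1 p.2)).count u : Int) :=
      ih hnd' ms' hsub' u
    rw [htail, hT1, hT2, hT3]
    -- right-hand side via the permutation to replicate f x ++ ms'
    have hperm : ms.Perm (List.replicate f x ++ ms') := by
      have h1 := List.filter_append_perm (fun z => z == x) ms
      rw [List.filter_beq x] at h1
      exact (h1.symm)
    rw [(pvPairsPerm hperm).count_eq u, pvPairsRepl f x ms' u]
    by_cases hv : pvVal x x = u
    · rw [if_pos hv, if_pos hv]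
      push_cast
      ring
    · rw [if_neg hv, if_neg hv]
      push_cast
      ring


lemma pvEntriesPos : ∀ (l : List (Nat × Int)), (∀ p ∈ l, 0 < p.2) →
    ∀ e ∈ pvEntries l, 0 < e.2 := by
  intro l
  induction l with
  | nil => intro _ e he; simp [pvEntries] at he
  | cons p rest ih =>
    intro h e he
    obtain ⟨x, fx⟩ := p
    rw [pvEntries] at he
    rcases List.mem_append.1 he with he | he
    · rcases List.mem_append.1 he with he | he
      · by_cases h2 : fx > 1
        · rw [if_pos h2] at he
          simp at he
          subst he
          have h1 : (1:Int) ≤ PySem.Int.floordiv (fx * (fx - 1)) 2 := by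
            rw [PySem.Int.le_floordiv_iff_mul_le (by norm_num)]
            nlinarith
          simpa using h1
        · rw [if_neg h2] at he; simp at he
      · obtain ⟨q, hq, rfl⟩ := List.mem_map.1 he
        have hfx : 0 < fx := h (x, fx) (by simp)
        have hfy : 0 < q.2 := h q (by simp [hq])
        exact mul_pos hfx hfy
    · exact ih (fun p hp => h p (by simp [hp])) e he

-- A's append-loop builds the flat list of per-pair values
lemma pvListA_eq (topic : List String) :
    (PySem.List.pyRange 0 (topic.length : Int) 1).foldl (fun acc i =>
        (PySem.List.pyRange (i + 1) (topic.length : Int) 1).foldl (fun acc j =>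
          acc ++ [pvValA topic i j]) acc) []
      = (PySem.List.pyRange 0 (topic.length : Int) 1).flatMap (fun i =>
          (PySem.List.pyRange (i + 1) (topic.length : Int) 1).map (fun j => pvValA topic i j)) := by
  have h : ∀ (acc : List Int) (i : Int),
      (PySem.List.pyRange (i + 1) (topic.length : Int) 1).foldl (fun acc j =>
        acc ++ [pvValA topic i j]) acc
        = acc ++ (PySem.List.pyRange (i + 1) (topic.length : Int) 1).map (fun j => pvValA topic i j) :=
    fun acc i => PySem.List.foldl_append_singleton_eq_map _ _ _
  calc (PySem.List.pyRange 0 (topic.length : Int) 1).foldl (fun acc i =>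
        (PySem.List.pyRange (i + 1) (topic.length : Int) 1).foldl (fun acc j =>
          acc ++ [pvValA topic i j]) acc) []
      = (PySem.List.pyRange 0 (topic.length : Int) 1).foldl (fun acc i =>
          acc ++ (PySem.List.pyRange (i + 1) (topic.length : Int) 1).map (fun j => pvValA topic i j)) [] := by
        apply PySem.List.foldl_congr_mem
        intro acc i _
        exact h acc i
    _ = [] ++ (PySem.List.pyRange 0 (topic.length : Int) 1).flatMap (fun i =>
          (PySem.List.pyRange (i + 1) (topic.length : Int) 1).map (fun j => pvValA topic i j)) :=
        PySem.List.foldl_append_eq_flatMap _ _ _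
    _ = _ := by simp

-- the A-side flat pair-value list over the mask list
lemma pvListVA (topic : List String) :
    (PySem.List.pyRange 0 (topic.length : Int) 1).flatMap (fun i =>
        (PySem.List.pyRange (i + 1) (topic.length : Int) 1).map (fun j => pvValA topic i j))
      = (pvPairs (topic.map pvMask)).map (fun p => pvVal p.1 p.2) := by
  have hlen : ((topic.map pvMask).length : Int) = (topic.length : Int) := by simp
  calc (PySem.List.pyRange 0 (topic.length : Int) 1).flatMap (fun i =>
        (PySem.List.pyRange (i + 1) (topic.length : Int) 1).map (fun j => pvValA topic i j))
      = (PySem.List.pyRange 0 ((topic.map pvMask).length : Int) 1).flatMap (fun i =>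
        (PySem.List.pyRange (i + 1) ((topic.map pvMask).length : Int) 1).map (fun j =>
          pvVal (PySem.List.pyGetD (topic.map pvMask) i 0) (PySem.List.pyGetD (topic.map pvMask) j 0))) := by
        rw [← hlen, List.flatMap_def, List.flatMap_def]
        congr 1
        apply List.map_congr_left
        intro i _
        apply List.map_congr_left
        intro j _
        exact pvValA_eq topic i j
    _ = _ := pvRangePairs (topic.map pvMask) (fun x y => pvVal x y)

-- ===== VERDICT (by name: the statement is the Claim_ definition above) =====
theorem acmTeam_spec : Claim_equal_acmTeam := by
  intro topic _ hpre
  show acmTeam topic = acmTeam_alt topic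
  have hpre' : 2 ≤ (topic.length : Int) := by exact_mod_cast hpre
  set ms := topic.map pvMask with hms
  set VA := (pvPairs ms).map (fun p => pvVal p.1 p.2) with hVA
  -- A's side
  have hA : acmTeam topic =
      (match PySem.List.max? VA (fun x => x) with
       | some m => [m, (PySem.List.count VA m : Int)]
       | none => []) := by
    show (match PySem.List.max? ((PySem.List.pyRange 0 (topic.length : Int) 1).foldl (fun acc i =>
        (PySem.List.pyRange (i + 1) (topic.length : Int) 1).foldl (fun acc j =>
          acc ++ [pvValA topic i j]) acc) []) (fun x => x) with
       | some m => [m, (PySem.List.count ((PySem.List.pyRange 0 (topic.length : Int) 1).foldl (fun acc i =>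
          (PySem.List.pyRange (i + 1) (topic.length : Int) 1).foldl (fun acc j =>
            acc ++ [pvValA topic i j]) acc) []) m : Int)]
       | none => []) = _
    rw [pvListA_eq topic, pvListVA topic]
  -- B's side
  set D := PySem.Set.ofList ms with hD
  set E := pvEntries (D.map (fun k => (k, (ms.count k : Int)))) with hE
  have hpositems : ∀ p ∈ D.map (fun k => (k, (ms.count k : Int))), 0 < p.2 := by
    intro p hp
    obtain ⟨k, hk, rfl⟩ := List.mem_map.1 hp
    have hk2 : k ∈ ms := (PySem.Set.mem_ofList ms k).1 hk
    have hk3 := List.count_pos_iff.2 hk2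
    show (0 : Int) < (ms.count k : Int)
    exact_mod_cast hk3
  have hpos : ∀ e ∈ E, 0 < e.2 := pvEntriesPos _ hpositems
  have hwc : ∀ u, pvWsum E u = (VA.count u : Int) := fun u =>
    pvWsumCount D (PySem.Set.nodup_ofList ms) ms (fun z hz => (PySem.Set.mem_ofList ms z).2 hz) u
  have hB : acmTeam_alt topic =
      (if ((E.foldl (fun st e => pvUpd st e.1 e.2) ((-1 : Int), (0 : Int))).1 < 0) then []
       else [(E.foldl (fun st e => pvUpd st e.1 e.2) ((-1 : Int), (0 : Int))).1,
             (E.foldl (fun st e => pvUpd st e.1 e.2) ((-1 : Int), (0 : Int))).2]) := by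
    show (if (pvPairLoop (topic.foldl (fun d s =>
        let m := pvMask s
        d.insert m (d.getD m 0 + 1)) PySem.Dict.empty).items ((-1 : Int), (0 : Int))).1 < 0 then []
      else [(pvPairLoop (topic.foldl (fun d s =>
        let m := pvMask s
        d.insert m (d.getD m 0 + 1)) PySem.Dict.empty).items ((-1 : Int), (0 : Int))).1,
            (pvPairLoop (topic.foldl (fun d s =>
        let m := pvMask s
        d.insert m (d.getD m 0 + 1)) PySem.Dict.empty).items ((-1 : Int), (0 : Int))).2]) = _
    have hfreq : topic.foldl (fun d s =>
        let m := pvMask s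
        d.insert m (d.getD m 0 + 1)) PySem.Dict.empty = PySem.Dict.counter ms := by
      rw [hms, ← PySem.Dict.foldl_insert_getD_add_one_eq_counter, List.foldl_map]
    rw [hfreq, PySem.Dict.items_counter, pvPairLoop_eq]
  rw [pvUpdFold E hpos (-1) 0] at hB
  set MB := (E.map (·.1)).foldl max (-1) with hMB
  -- VA is a nonempty list of nonnegative values
  obtain ⟨a, b, t, hmsc⟩ : ∃ a b t, ms = a :: b :: t := by
    have : 2 ≤ ms.length := by rw [hms]; simpa using hpre
    match ms, this with
    | a :: b :: t, _ => exact ⟨a, b, t, rfl⟩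
  have hVAc : VA = pvVal a b :: ((t.map (fun y => (a, y)) ++ pvPairs (b :: t)).map (fun p => pvVal p.1 p.2)) := by
    rw [hVA, hmsc]
    simp [pvPairs]
  have hvnn : ∀ y ∈ VA, 0 ≤ y := by
    intro y hy
    rw [hVA] at hy
    obtain ⟨p, _, rfl⟩ := List.mem_map.1 hy
    exact Int.natCast_nonneg _
  set vr := ((t.map (fun y => (a, y)) ++ pvPairs (b :: t)).map (fun p => pvVal p.1 p.2)) with hvr
  set MA := vr.foldl max (pvVal a b) with hMA
  have hMAnn : 0 ≤ MA := le_trans (Int.natCast_nonneg _) (PySem.List.le_foldl_max vr (pvVal a b)).1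

  have hMAmem : MA ∈ VA := by
    rcases PySem.List.foldl_max_mem vr (pvVal a b) with h | h
    · rw [hVAc, hMA, h]; exact List.mem_cons_self
    · rw [hVAc]; exact List.mem_cons_of_mem _ h
  -- MB = MA
  have hle1 : ∀ u ∈ E.map (·.1), u ≤ MA := by
    intro u hu
    have h1 := pvWsum_pos_of_mem E hpos u hu
    rw [hwc u] at h1
    have h2 : u ∈ VA := List.count_pos_iff.1 (by exact_mod_cast h1)
    have := (PySem.List.le_foldl_max vr (pvVal a b)).2
    rw [hVAc] at h2
    rcases List.mem_cons.1 h2 with rfl | h2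
    · exact (PySem.List.le_foldl_max vr (pvVal a b)).1
    · exact this u h2
  have hle2 : MA ≤ MB := by
    have h1 : (0:Int) < (VA.count MA : Int) := by exact_mod_cast List.count_pos_iff.2 hMAmem
    rw [← hwc MA] at h1
    have h2 : MA ∈ E.map (·.1) := by
      by_contra h
      rw [pvWsum_eq_zero_of_not_mem E MA h] at h1
      omega
    exact (PySem.List.le_foldl_max (E.map (·.1)) (-1)).2 MA h2
  have hMBMA : MB = MA := by
    rcases PySem.List.foldl_max_mem (E.map (·.1)) (-1) with h | h
    · rw [hMB, h] at hle2 ⊢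
      omega
    · exact le_antisymm (hle1 MB h) hle2
  -- assemble
  have hmax : PySem.List.max? VA (fun x => x) = some MA := by
    rw [hVAc, PySem.List.max?_id_cons, ← hMA]
  rw [hA, hB, hmax]
  show [MA, (PySem.List.count VA MA : Int)]
      = if MB < 0 then [] else [MB, (if MB = -1 then (0:Int) else 0) + pvWsum E MB]
  have hMBnn : ¬ (MB < 0) := by omega
  rw [if_neg hMBnn, hMBMA]
  have h1 : pvWsum E MA = (VA.count MA : Int) := hwc MA
  have h2 : (if MA = -1 then (0:Int) else 0) = 0 := by
    split_ifs with h
    · rfl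
    · rfl
  rw [h1, h2, zero_add, PySem.List.count_eq]
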